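-- pv_equiv track=rewrite | github.com/magnumnighthawk/household-memory-agent | telegram_bot.py | format_snippet_html
-- ===== SOURCE A (Python) =====
-- def escape_html(s: str) -> str:
--     """Escape HTML special characters for Telegram."""
--     return (
--         s.replace("&", "&amp;")
--          .replace("<", "&lt;")
--          .replace(">", "&gt;")
--     )
--
-- def format_snippet_html(snippet: str) -> str:
--     """Convert snippet with ** markers to HTML bold tags for Telegram."""
--     # First escape HTML special characters
--     escaped = escape_html(snippet)
--
--     # Convert ** markers to <b> tags
--     parts = escaped.split("**")
--     result = []
--     for i, part in enumerate(parts):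
--         if i % 2 == 1:  # Odd indices are highlighted text
--             result.append(f"<b>{part}</b>")
--         else:
--             result.append(part)
--
--     return "".join(result)
-- ===== SOURCE B (Python) =====
-- def format_snippet_html(snippet: str) -> str:
--     """Convert snippet with ** markers to HTML bold tags for Telegram.
--
--     Single left-to-right scan: HTML-escapes each character and toggles
--     bold tags at each marker, instead of three escape passes plus
--     split/enumerate/join.
--     """
--     out = []
--     bold = False
--     i = 0
--     n = len(snippet)
--     while i < n:
--         if snippet.startswith("**", i):
--             out.append("</b>" if bold else "<b>")
--             bold = not bold
--             i += 2
--         else: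
--             c = snippet[i]
--             if c == "&":
--                 out.append("&amp;")
--             elif c == "<":
--                 out.append("&lt;")
--             elif c == ">":
--                 out.append("&gt;")
--             else:
--                 out.append(c)
--             i += 1
--     if bold:
--         out.append("</b>")
--     return "".join(out)
-- ===== Notes on version B (the rewrite author's own statement) =====
-- stated objective: alternative
-- what changed: Replaced the three full .replace passes plus split on the marker/enumerate/join with one left-to-right scan that escapes each character and toggles a bold_open flag at each double-asterisk marker.
import Mathlib
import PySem

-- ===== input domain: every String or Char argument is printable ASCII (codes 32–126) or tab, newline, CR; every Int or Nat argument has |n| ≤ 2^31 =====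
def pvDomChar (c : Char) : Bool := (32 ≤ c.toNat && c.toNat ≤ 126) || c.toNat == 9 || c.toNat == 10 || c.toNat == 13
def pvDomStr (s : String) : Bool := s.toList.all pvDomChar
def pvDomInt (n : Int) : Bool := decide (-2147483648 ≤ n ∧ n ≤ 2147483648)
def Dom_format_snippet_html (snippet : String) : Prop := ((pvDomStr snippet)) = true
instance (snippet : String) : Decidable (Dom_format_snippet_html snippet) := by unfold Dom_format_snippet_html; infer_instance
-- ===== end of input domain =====

-- B replaces A's three .replace passes plus split-on-marker/enumerate/join by a single
-- left-to-right scan that escapes each character and toggles a bold flag at each marker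
-- (objective: alternative single-pass decomposition; same O(n) cost).

-- ===== PORT A =====
def escape_html (s : String) : String :=
  PySem.Str.replace (PySem.Str.replace (PySem.Str.replace s "&" "&amp;") "<" "&lt;") ">" "&gt;"

def format_snippet_html (snippet : String) : String :=
  let escaped := escape_html snippet
  let parts := (PySem.Str.split? escaped "**").getD []
  let result := (PySem.List.enumerate parts).foldl
    (fun acc ip =>
      if PySem.Int.mod ip.1 2 == 1 then
        acc ++ [String.ofList ("<b>".toList ++ ip.2.toList ++ "</b>".toList)]
      else
        acc ++ [ip.2]) []
  PySem.Str.join "" result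

-- ===== PORT B =====
-- the while-loop of Source B: the index scan becomes structural recursion on the remaining
-- characters; `out` is built front-to-back, `bold` is the toggle
def pvScan : List Char → Bool → List String
  | [], bold => if bold then ["</b>"] else []
  | '*' :: '*' :: t, bold => (if bold then "</b>" else "<b>") :: pvScan t !bold
  | c :: t, bold =>
      (if c = '&' then "&amp;"
       else if c = '<' then "&lt;"
       else if c = '>' then "&gt;"
       else String.ofList [c]) :: pvScan t bold

def format_snippet_html_alt (snippet : String) : String :=
  PySem.Str.join "" (pvScan snippet.toList false)

-- ===== PRECONDITION & SPEC =====
def Spec_format_snippet_html (snippet : String) (out : String) : Prop := out = format_snippet_html_alt snippet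
instance (snippet : String) (out : String) : Decidable (Spec_format_snippet_html snippet out) := by unfold Spec_format_snippet_html; infer_instance

-- ===== CLAIM (what is proved, stated in full; the proofs are below) =====
def Claim_equal_format_snippet_html : Prop := ∀ (snippet : String), Dom_format_snippet_html snippet → Spec_format_snippet_html snippet (format_snippet_html snippet)

-- ===== LEMMAS AND PROOFS =====

-- per-character HTML escaping, the common denominator of both sides
def escL (c : Char) : List Char :=
  if c = '&' then "&amp;".toList
  else if c = '<' then "&lt;".toList
  else if c = '>' then "&gt;".toList
  else [c]

-- clean recursive form of splitting on "**"
def pvSplitParts : List Char → List (List Char)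
  | [] => [[]]
  | '*' :: '*' :: t => [] :: pvSplitParts t
  | c :: t => (c :: (pvSplitParts t).headI) :: (pvSplitParts t).tail

-- the '**'-toggle scan over an already-escaped character list (stream form of both sides)
def scanEJ : List Char → Bool → List Char
  | [], b => if b then "</b>".toList else []
  | '*' :: '*' :: t, b => (if b then "</b>".toList else "<b>".toList) ++ scanEJ t !b
  | c :: t, b => c :: scanEJ t b

-- emit parts with a tag at each part boundary (b = a bold group is currently open)
def pvW : List (List Char) → Bool → List Char
  | [], b => if b then "</b>".toList else []
  | [p], b => p ++ (if b then "</b>".toList else [])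
  | p :: ps, b => p ++ (if b then "</b>".toList else "<b>".toList) ++ pvW ps !b

-- A's wrapping of the odd-indexed parts
def pvWL : List (List Char) → Bool → List Char
  | [], _ => []
  | p :: ps, b => (if b then "<b>".toList ++ p ++ "</b>".toList else p) ++ pvWL ps !b

theorem replaceGo_single (a : Char) (new : List Char) :
    ∀ (l : List Char) (fuel : Nat) (acc : List Char), l.length ≤ fuel →
      PySem.Chars.replace.go [a] new fuel l acc
        = acc.reverse ++ l.flatMap (fun c => if c = a then new else [c]) := by
  intro l
  induction l with
  | nil =>
    intro fuel acc h
    cases fuel <;> simp [PySem.Chars.replace.go]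
  | cons c t ih =>
    intro fuel acc h
    cases fuel with
    | zero => simp at h
    | succ f =>
      by_cases hc : c = a
      · subst hc
        rw [PySem.Chars.replace.go]
        simp [List.isPrefixOf]
        rw [ih f (new.reverse ++ acc) (by simpa using h)]
        simp
      · rw [PySem.Chars.replace.go]
        simp [List.isPrefixOf, Ne.symm hc]
        rw [ih f (c :: acc) (by simpa using h)]
        simp [hc]

theorem replace_single (l : List Char) (a : Char) (new : List Char) :
    PySem.Chars.replace l [a] new = l.flatMap (fun c => if c = a then new else [c]) := by
  rw [PySem.Chars.replace]
  simp [replaceGo_single a new l l.length [] le_rfl]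

theorem escape_toList (s : String) :
    (escape_html s).toList = s.toList.flatMap escL := by
  rw [escape_html, PySem.Str.toList_replace, PySem.Str.toList_replace, PySem.Str.toList_replace]
  have h1 : ("&" : String).toList = ['&'] := rfl
  have h2 : ("<" : String).toList = ['<'] := rfl
  have h3 : (">" : String).toList = ['>'] := rfl
  rw [h1, h2, h3, replace_single, replace_single, replace_single,
      List.flatMap_assoc, List.flatMap_assoc]
  apply List.flatMap_congr
  intro c _
  by_cases hc1 : c = '&'
  · subst hc1; rfl
  · by_cases hc2 : c = '<'
    · subst hc2; rfl
    · by_cases hc3 : c = '>'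
      · subst hc3; rfl
      · simp [escL, hc1, hc2, hc3]

theorem pvSplitParts_ne_nil (l : List Char) : pvSplitParts l ≠ [] := by
  induction l using pvSplitParts.induct <;> simp [pvSplitParts]

theorem splitOnGo (fuel : Nat) (l cur : List Char) (acc : List (List Char)) (h : l.length < fuel) :
    PySem.Chars.splitOn.go ['*','*'] fuel l cur acc
      = acc.reverse ++ ((cur.reverse ++ (pvSplitParts l).headI) :: (pvSplitParts l).tail) := by
  induction l using pvSplitParts.induct generalizing fuel cur acc with
  | case1 =>
    cases fuel with
    | zero => omega
    | succ f => simp [PySem.Chars.splitOn.go, pvSplitParts]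
  | case2 t ih =>
    cases fuel with
    | zero => omega
    | succ f =>
      have hp : ['*','*'].isPrefixOf ('*' :: '*' :: t) = true := by simp [List.isPrefixOf]
      rw [PySem.Chars.splitOn.go, if_pos hp]
      rw [show List.drop (['*','*'].length) ('*' :: '*' :: t) = t from rfl]
      rw [ih f [] (cur.reverse :: acc) (by simp at h ⊢; omega)]
      cases hPt : pvSplitParts t with
      | nil => exact absurd hPt (pvSplitParts_ne_nil t)
      | cons q qs => simp [pvSplitParts, hPt]
  | case3 c t hcond ih =>
    cases fuel with
    | zero => omega
    | succ f =>
      have hp : ['*','*'].isPrefixOf (c :: t) = false := by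
        cases t with
        | nil => simp [List.isPrefixOf]
        | cons d t' =>
          have hnd : ¬(c = '*' ∧ d = '*') := fun ⟨ha, hb⟩ => hcond t' ha (by rw [hb])
          simp [List.isPrefixOf]
          intro h1 h2
          exact absurd ⟨h1.symm, h2.symm⟩ hnd
      rw [PySem.Chars.splitOn.go, hp]
      rw [ih f (c :: cur) acc (by simp at h ⊢; omega)]
      have hsp : pvSplitParts (c :: t) = (c :: (pvSplitParts t).headI) :: (pvSplitParts t).tail := by
        rw [pvSplitParts.eq_def]
        split
        · simp_all
        · rename_i heq; injection heq with e1 e2; exact absurd (hcond _ e1 e2) not_false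
        · rename_i heq; injection heq with e1 e2; subst e1; subst e2; rfl
      rw [hsp]
      simp

theorem splitOn_eq (l : List Char) :
    PySem.Chars.splitOn l ['*','*'] = pvSplitParts l := by
  rw [PySem.Chars.splitOn, splitOnGo (l.length + 1) l [] [] (by omega)]
  cases hP : pvSplitParts l with
  | nil => exact absurd hP (pvSplitParts_ne_nil l)
  | cons q qs => simp

theorem scanEJ_eq_pvW (m : List Char) (b : Bool) :
    scanEJ m b = pvW (pvSplitParts m) b := by
  induction m using pvSplitParts.induct generalizing b with
  | case1 => simp [scanEJ, pvSplitParts, pvW]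
  | case2 t ih =>
    rw [show pvSplitParts ('*' :: '*' :: t) = [] :: pvSplitParts t from rfl]
    cases hPt : pvSplitParts t with
    | nil => exact absurd hPt (pvSplitParts_ne_nil t)
    | cons q qs =>
      rw [show scanEJ ('*' :: '*' :: t) b
            = (if b then "</b>".toList else "<b>".toList) ++ scanEJ t !b from rfl]
      rw [ih, hPt, show pvW ([] :: q :: qs) b
            = [] ++ (if b then "</b>".toList else "<b>".toList) ++ pvW (q :: qs) !b from rfl]
      simp
  | case3 c t hcond ih =>
    have hscan : scanEJ (c :: t) b = c :: scanEJ t b := by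
      rw [scanEJ.eq_def]
      split
      · rename_i heq; cases heq
      · rename_i heq; injection heq with e1 e2; exact absurd (hcond _ e1 e2) not_false
      · rename_i heq; injection heq with e1 e2; subst e1; subst e2; rfl
    have hsp : pvSplitParts (c :: t) = (c :: (pvSplitParts t).headI) :: (pvSplitParts t).tail := by
      rw [pvSplitParts.eq_def]
      split
      · simp_all
      · rename_i heq; injection heq with e1 e2; exact absurd (hcond _ e1 e2) not_false
      · rename_i heq; injection heq with e1 e2; subst e1; subst e2; rfl
    rw [hscan, hsp, ih]
    cases hPt : pvSplitParts t with
    | nil => exact absurd hPt (pvSplitParts_ne_nil t)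
    | cons q qs =>
      cases qs with
      | nil => simp [pvW]
      | cons q' qs' => simp [pvW]

theorem join_nil_cons (x : List Char) (xs : List (List Char)) :
    PySem.Chars.join [] (x :: xs) = x ++ PySem.Chars.join [] xs := by
  cases xs with
  | nil => simp [PySem.Chars.join, List.intercalate]
  | cons y ys => simp [PySem.Chars.join, List.intercalate]

theorem int_par_succ (k : Int) :
    (PySem.Int.mod (k + 1) 2 == 1) = !(PySem.Int.mod k 2 == 1) := by
  rw [PySem.Int.mod, PySem.Int.mod, Int.fmod_eq_emod, Int.fmod_eq_emod]
  have h2 : (0:Int) ≤ 2 := by omega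
  simp only [if_pos (Or.inl h2), add_zero]
  have := Int.emod_emod_of_dvd k (by norm_num : (2:Int) ∣ 2)
  have h1 : k % 2 = 0 ∨ k % 2 = 1 := by omega
  rcases h1 with h | h <;> rw [show (k+1) % 2 = (k % 2 + 1) % 2 from by omega] <;> simp [h]

theorem joinWrap_eq_pvWL (ps : List (List Char)) (k : Int) :
    PySem.Chars.join []
      (List.map String.toList
        ((PySem.List.enumerate (ps.map String.ofList) k).map
          (fun ip => if PySem.Int.mod ip.1 2 == 1
              then String.ofList ("<b>".toList ++ ip.2.toList ++ "</b>".toList)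
              else ip.2)))
      = pvWL ps (PySem.Int.mod k 2 == 1) := by
  induction ps generalizing k with
  | nil => simp [PySem.Chars.join, List.intercalate, pvWL]
  | cons p ps ih =>
    rw [List.map_cons, PySem.List.enumerate_cons, List.map_cons, List.map_cons, join_nil_cons]
    rw [ih (k + 1), int_par_succ k, pvWL]
    cases h : PySem.Int.mod k 2 == 1 <;> simp

theorem pvWL_eq_pvW (ps : List (List Char)) (b : Bool) (h : ps ≠ []) :
    pvWL ps b = (if b then "<b>".toList else []) ++ pvW ps b := by
  induction ps generalizing b with
  | nil => exact absurd rfl h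
  | cons p ps ih =>
    cases ps with
    | nil => cases b <;> simp [pvWL, pvW]
    | cons q qs =>
      rw [pvWL, ih (!b) (by simp)]
      cases b <;> simp [pvW]

set_option maxHeartbeats 1000000 in
theorem A_toList (s : String) :
    (format_snippet_html s).toList = pvW (pvSplitParts (s.toList.flatMap escL)) false := by
  show (PySem.Str.join "" ((PySem.List.enumerate ((PySem.Str.split? (escape_html s) "**").getD [])).foldl
    (fun acc ip =>
      if PySem.Int.mod ip.1 2 == 1 then
        acc ++ [String.ofList ("<b>".toList ++ ip.2.toList ++ "</b>".toList)]
      else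
        acc ++ [ip.2]) [])).toList = _
  have hsplit : (PySem.Str.split? (escape_html s) "**").getD []
      = (PySem.Chars.splitOn (escape_html s).toList ['*','*']).map String.ofList := by
    rw [PySem.Str.split?, PySem.Chars.split?,
        show ("**" : String).toList = ['*','*'] from rfl]
    simp
  rw [hsplit]
  have hfold : ∀ (xs : List (Int × String)),
      xs.foldl (fun acc ip =>
        if PySem.Int.mod ip.1 2 == 1 then
          acc ++ [String.ofList ("<b>".toList ++ ip.2.toList ++ "</b>".toList)]
        else acc ++ [ip.2]) []
      = xs.map (fun ip => if PySem.Int.mod ip.1 2 == 1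
          then String.ofList ("<b>".toList ++ ip.2.toList ++ "</b>".toList) else ip.2) := by
    intro xs
    have : (fun (acc : List String) (ip : Int × String) =>
        if PySem.Int.mod ip.1 2 == 1 then
          acc ++ [String.ofList ("<b>".toList ++ ip.2.toList ++ "</b>".toList)]
        else acc ++ [ip.2])
      = (fun acc ip => acc ++ [if PySem.Int.mod ip.1 2 == 1
          then String.ofList ("<b>".toList ++ ip.2.toList ++ "</b>".toList) else ip.2]) := by
      funext acc ip; split <;> rfl
    rw [this, PySem.List.foldl_append_singleton_eq_map]
    rfl
  rw [hfold, PySem.Str.toList_join]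
  rw [show ("" : String).toList = ([] : List Char) from rfl]
  rw [joinWrap_eq_pvWL _ 0]
  rw [show (PySem.Int.mod 0 2 == 1) = false from rfl]
  rw [splitOn_eq, escape_toList]
  rw [pvWL_eq_pvW _ _ (pvSplitParts_ne_nil _)]
  simp

theorem scanEJ_cons_ne_star (c : Char) (t : List Char) (b : Bool) (h : c ≠ '*') :
    scanEJ (c :: t) b = c :: scanEJ t b := by
  rw [scanEJ.eq_def]
  split
  · rename_i heq; cases heq
  · rename_i heq; injection heq with e1 e2; exact absurd e1 h
  · rename_i heq; injection heq with e1 e2; subst e1; subst e2; rfl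

theorem scanEJ_cons_star (t : List Char) (b : Bool) (h : t.head? ≠ some '*') :
    scanEJ ('*' :: t) b = '*' :: scanEJ t b := by
  rw [scanEJ.eq_def]
  split
  · rename_i heq; cases heq
  · rename_i heq; injection heq with e1 e2; rw [e2] at h; simp at h
  · rename_i heq; injection heq with e1 e2; subst e1; subst e2; rfl

theorem flatMap_escL_head (t : List Char) (h : t.head? ≠ some '*') :
    (t.flatMap escL).head? ≠ some '*' := by
  cases t with
  | nil => simp
  | cons d t' =>
    simp only [List.head?_cons] at h
    have hd : d ≠ '*' := fun e => h (by rw [e])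
    by_cases h1 : d = '&'
    · subst h1; simp [escL]
    · by_cases h2 : d = '<'
      · subst h2; simp [escL]
      · by_cases h3 : d = '>'
        · subst h3; simp [escL]
        · simp [escL, h1, h2, h3, hd]

theorem B_join (l : List Char) (b : Bool) :
    PySem.Chars.join [] ((pvScan l b).map String.toList) = scanEJ (l.flatMap escL) b := by
  induction l, b using pvScan.induct with
  | case1 =>
    simp [pvScan, scanEJ, PySem.Chars.join, List.intercalate]
  | case2 b hb =>
    simp at hb; subst hb
    simp [pvScan, scanEJ, PySem.Chars.join, List.intercalate]
  | case3 t b ih =>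
    rw [show pvScan ('*' :: '*' :: t) b
          = (if b then "</b>" else "<b>") :: pvScan t !b from rfl]
    rw [List.map_cons, join_nil_cons, ih]
    rw [show ('*' :: '*' :: t).flatMap escL = '*' :: '*' :: t.flatMap escL from rfl]
    rw [show scanEJ ('*' :: '*' :: (t.flatMap escL)) b
          = (if b then "</b>".toList else "<b>".toList) ++ scanEJ (t.flatMap escL) !b from rfl]
    cases b <;> rfl
  | case4 c t b hcond ih =>
    have hscan : pvScan (c :: t) b
        = (if c = '&' then "&amp;"
           else if c = '<' then "&lt;"
           else if c = '>' then "&gt;"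
           else String.ofList [c]) :: pvScan t b := by
      rw [pvScan.eq_def]
      split
      · rename_i heq; cases heq
      · rename_i heq; injection heq with e1 e2; exact absurd (hcond _ e1 e2) not_false
      · rename_i heq; injection heq with e1 e2; subst e1; subst e2; rfl
    rw [hscan, List.map_cons, join_nil_cons, ih]
    rw [show (c :: t).flatMap escL = escL c ++ t.flatMap escL from rfl]
    by_cases h1 : c = '&'
    · subst h1
      simp only [reduceIte]
      rw [show escL '&' = "&amp;".toList from rfl,
          show ("&amp;" : String).toList = ['&','a','m','p',';'] from rfl]
      simp only [List.cons_append, List.nil_append]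
      rw [scanEJ_cons_ne_star '&' _ _ (by decide), scanEJ_cons_ne_star 'a' _ _ (by decide),
          scanEJ_cons_ne_star 'm' _ _ (by decide), scanEJ_cons_ne_star 'p' _ _ (by decide),
          scanEJ_cons_ne_star ';' _ _ (by decide)]
    · by_cases h2 : c = '<'
      · subst h2
        simp only [reduceIte, if_neg h1]
        rw [show escL '<' = "&lt;".toList from rfl,
            show ("&lt;" : String).toList = ['&','l','t',';'] from rfl]
        simp only [List.cons_append, List.nil_append]
        rw [scanEJ_cons_ne_star '&' _ _ (by decide), scanEJ_cons_ne_star 'l' _ _ (by decide),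
            scanEJ_cons_ne_star 't' _ _ (by decide), scanEJ_cons_ne_star ';' _ _ (by decide)]
      · by_cases h3 : c = '>'
        · subst h3
          simp only [reduceIte, if_neg h1, if_neg h2]
          rw [show escL '>' = "&gt;".toList from rfl,
              show ("&gt;" : String).toList = ['&','g','t',';'] from rfl]
          simp only [List.cons_append, List.nil_append]
          rw [scanEJ_cons_ne_star '&' _ _ (by decide), scanEJ_cons_ne_star 'g' _ _ (by decide),
              scanEJ_cons_ne_star 't' _ _ (by decide), scanEJ_cons_ne_star ';' _ _ (by decide)]
        · rw [show escL c = [c] from by simp [escL, h1, h2, h3]]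
          by_cases hstar : c = '*'
          · subst hstar
            have ht : t.head? ≠ some '*' := by
              cases t with
              | nil => simp
              | cons d t' =>
                intro he
                simp only [List.head?_cons, Option.some.injEq] at he
                exact hcond t' rfl (by rw [he])
            rw [List.singleton_append, scanEJ_cons_star _ _ (flatMap_escL_head t ht)]
            simp [h1, h2, h3]
          · rw [List.singleton_append, scanEJ_cons_ne_star c _ _ hstar]
            simp [h1, h2, h3]

theorem B_toList (s : String) :
    (format_snippet_html_alt s).toList = scanEJ (s.toList.flatMap escL) false := by
  rw [format_snippet_html_alt, PySem.Str.toList_join,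
      show ("" : String).toList = ([] : List Char) from rfl, B_join]

-- ===== VERDICT (by name: the statement is the Claim_ definition above) =====
theorem format_snippet_html_spec : Claim_equal_format_snippet_html := by
  intro s _
  unfold Spec_format_snippet_html
  have h : (format_snippet_html s).toList = (format_snippet_html_alt s).toList := by
    rw [A_toList, B_toList, scanEJ_eq_pvW]
  calc format_snippet_html s = String.ofList (format_snippet_html s).toList := by rw [String.ofList_toList]
    _ = String.ofList (format_snippet_html_alt s).toList := by rw [h]
    _ = format_snippet_html_alt s := by rw [String.ofList_toList]
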